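-- pv_equiv track=rewrite | github.com/matheus-oliveira112/Disciplina-de-processamento-digital-de-sinais | Tarefa 7 - Codificação ZRL e janelamento/Semana7_EX1.py | ZRL
-- ===== SOURCE A (Python) =====
-- def ZRL(x):
--     out = []
--
--     # Se o primeiro valor for diferente de zero → grava literal e começa do segundo
--     if x[0] != 0:
--         out.append(int(x[0]))
--         i = 1
--     else:
--         # Caso comece com zeros → começa do início
--         i = 0
--
--     # Percorre o vetor, contando zeros e emitindo pares (valor, zeros_anteriores)
--     zeros = 0
--     while i < len(x):
--         if x[i] == 0:
--             zeros += 1                # acumula zeros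
--         else:
--             out.extend([int(x[i]), zeros])  # grava o valor e quantos zeros vieram antes
--             zeros = 0
--         i += 1
--
--     # Zeros finais não são codificados neste formato
--     return out
-- ===== SOURCE B (Python) =====
-- def ZRL(x):
--     # Index the nonzero entries once, then compute zero-run lengths by index subtraction.
--     nz = [(i, v) for i, v in enumerate(x) if v != 0]
--     out = []
--     prev = -1
--     for p, v in nz:
--         if prev == -1 and p == 0:
--             out.append(int(v))          # leading nonzero is emitted alone
--         else:
--             out += [int(v), p - prev - 1]
--         prev = p
--     return out
-- ===== Notes on version B (the rewrite author's own statement) =====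
-- stated objective: alternative
-- what changed: B first builds an index of nonzero positions via enumerate and derives each zero-run length by index subtraction (p - prev - 1), instead of A's running zero counter over every element.
import Mathlib
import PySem

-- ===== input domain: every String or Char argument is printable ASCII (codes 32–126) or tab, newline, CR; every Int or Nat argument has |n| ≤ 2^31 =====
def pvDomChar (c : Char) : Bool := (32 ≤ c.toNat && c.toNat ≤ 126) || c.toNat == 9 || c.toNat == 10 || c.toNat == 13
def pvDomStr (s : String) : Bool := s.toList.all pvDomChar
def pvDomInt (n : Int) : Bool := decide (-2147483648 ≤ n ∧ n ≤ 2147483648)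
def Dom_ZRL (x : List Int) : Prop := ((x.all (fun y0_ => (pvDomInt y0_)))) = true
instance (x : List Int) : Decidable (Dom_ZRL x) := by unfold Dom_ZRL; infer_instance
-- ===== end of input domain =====

-- B replaces A's element-by-element zero counter with an index of nonzero positions,
-- deriving each run length by index subtraction (objective: alternative decomposition).

-- ===== PORT A =====
-- A's while-loop body, state (out, zeros).
def pvStepA (st : List Int × Int) (xi : Int) : List Int × Int :=
  if xi = 0 then (st.1, st.2 + 1) else (st.1 ++ [xi, st.2], 0)

-- A's while loop over i with state (out, zeros) is ported as a fold over the remaining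
-- elements carrying the same state; x[0] on [] raises in Python (outside Pre_).
def ZRL (x : List Int) : List Int :=
  match x with
  | [] => []  -- Python: IndexError on x[0]
  | x0 :: rest =>
    if x0 ≠ 0 then (rest.foldl pvStepA ([x0], 0)).1
    else ((x0 :: rest).foldl pvStepA ([], 0)).1

-- ===== PORT B =====
-- B's for-loop body, state (out, prev).
def pvStepB (st : List Int × Int) (pv : Int × Int) : List Int × Int :=
  if st.2 = -1 ∧ pv.1 = 0 then (st.1 ++ [pv.2], pv.1)
  else (st.1 ++ [pv.2, pv.1 - st.2 - 1], pv.1)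

def ZRL_alt (x : List Int) : List Int :=
  (((PySem.List.enumerate x).filter (fun pv => pv.2 ≠ 0)).foldl pvStepB ([], -1)).1

-- ===== PRECONDITION & SPEC =====
-- Pre_ excludes only the empty list, on which A raises IndexError (x[0]).
def Pre_ZRL (x : List Int) : Prop := x ≠ []
instance (x : List Int) : Decidable (Pre_ZRL x) := by unfold Pre_ZRL; infer_instance
def pvWitness_ZRL : List Int := [3, 0, 0, 5, 0]

def Spec_ZRL (x : List Int) (out : List Int) : Prop := out = ZRL_alt x
instance (x : List Int) (out : List Int) : Decidable (Spec_ZRL x out) := by unfold Spec_ZRL; infer_instance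

-- ===== CLAIM (what is proved, stated in full; the proofs are below) =====
def Claim_equal_ZRL : Prop := ∀ (x : List Int), Dom_ZRL x → Pre_ZRL x → Spec_ZRL x (ZRL x)

-- ===== LEMMAS AND PROOFS =====

-- Core invariant: walking l from absolute index k with `z` zeros pending on the A side
-- corresponds, on the B side, to a last-nonzero index prev = k - z - 1.
theorem pv_main (l acc : List Int) (k z : Nat)
    (h0 : k = 0 → z = 0 ∧ (l = [] ∨ ∃ r, l = 0 :: r)) :
    (l.foldl pvStepA (acc, (z : Int))).1
      = (((PySem.List.enumerate l (k : Int)).filter (fun pv => pv.2 ≠ 0)).foldl pvStepB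
          (acc, (k : Int) - (z : Int) - 1)).1 := by
  induction l generalizing acc k z with
  | nil => simp [PySem.List.enumerate]
  | cons v r ih =>
    rw [PySem.List.enumerate_cons]
    by_cases hv : v = 0
    · subst hv
      rw [List.filter_cons_of_neg (by simp), List.foldl_cons,
          show pvStepA (acc, (z : Int)) 0 = (acc, (z : Int) + 1) from by simp [pvStepA]]
      have := ih acc (k + 1) (z + 1) (by omega)
      rw [show (((z + 1 : Nat) : Int)) = (z : Int) + 1 from by push_cast; ring,
          show (((k + 1 : Nat) : Int)) - ((z : Int) + 1) - 1 = (k : Int) - (z : Int) - 1 from by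
            push_cast; ring,
          show (((k + 1 : Nat) : Int)) = (k : Int) + 1 from by push_cast; ring] at this
      exact this
    · have hk : (k : Int) ≠ 0 := by
        intro hk0
        have : k = 0 := by exact_mod_cast hk0
        rcases (h0 this).2 with h | ⟨s, hs⟩ <;> simp_all
      rw [List.filter_cons_of_pos (by simpa using hv), List.foldl_cons, List.foldl_cons,
          show pvStepA (acc, (z : Int)) v = (acc ++ [v, (z : Int)], 0) from by
            simp [pvStepA, hv],
          show pvStepB (acc, (k : Int) - (z : Int) - 1) ((k : Int), v)
              = (acc ++ [v, (z : Int)], (k : Int)) from by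
            simp only [pvStepB]
            rw [if_neg (fun h => hk h.2),
                show (k : Int) - ((k : Int) - (z : Int) - 1) - 1 = (z : Int) from by ring]]
      have := ih (acc ++ [v, (z : Int)]) (k + 1) 0 (by omega)
      have e1 : (((k + 1 : Nat) : Int)) - ((0 : Nat) : Int) - 1 = (k : Int) := by push_cast; ring
      have e2 : (((k + 1 : Nat) : Int)) = (k : Int) + 1 := by push_cast; ring
      rw [e1, e2] at this
      exact this

theorem pv_ports_eq (x : List Int) (hx : x ≠ []) : ZRL x = ZRL_alt x := by
  match x with
  | x0 :: rest =>
    rw [show ZRL (x0 :: rest)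
          = (if x0 ≠ 0 then (rest.foldl pvStepA ([x0], 0)).1
             else ((x0 :: rest).foldl pvStepA ([], 0)).1) from rfl]
    unfold ZRL_alt
    by_cases h : x0 = 0
    · subst h
      rw [if_neg (by simp)]
      exact pv_main ((0 : Int) :: rest) [] 0 0 (fun _ => ⟨rfl, Or.inr ⟨rest, rfl⟩⟩)
    · rw [if_pos (by simpa using h), PySem.List.enumerate_cons,
          List.filter_cons_of_pos (by simpa using h), List.foldl_cons,
          show pvStepB (([] : List Int), -1) ((0 : Int), x0) = ([x0], 0) from by
            simp [pvStepB]]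
      exact pv_main rest [x0] 1 0 (by omega)

-- ===== VERDICT (by name: the statement is the Claim_ definition above) =====
theorem ZRL_spec : Claim_equal_ZRL := by
  intro x _ hpre
  unfold Spec_ZRL
  exact pv_ports_eq x hpre
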